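-- pv_equiv track=rewrite | github.com/tsrnd/hello-python | PracticCodeSyntax.py | sortByHeight
-- ===== SOURCE A (Python) =====
-- def sortByHeight(a):
--     result = []
--     notTree = []
--     for element in a:
--         if element != -1:
--             notTree.append(element)
--     for element in a:
--         if element == -1:
--             result.append(element)
--         else:
--             result.append(min(notTree))
--             del notTree[notTree.index(min(notTree))]
--     return result
-- ===== SOURCE B (Python) =====
-- def sortByHeight(a):
--     result = list(a)
--     idx = [i for i, x in enumerate(a) if x != -1]
--     vals = sorted(x for x in a if x != -1)
--     for pos, v in zip(idx, vals):
--         result[pos] = v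
--     return result
-- ===== Notes on version B (the rewrite author's own statement) =====
-- stated objective: faster
-- what changed: A repeatedly scans the remaining non-(-1) values with min() and list.index() for every position (quadratic-plus); B sorts the non-(-1) values once and scatters them into the recorded non-(-1) positions of a copy of the input.
import Mathlib
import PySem

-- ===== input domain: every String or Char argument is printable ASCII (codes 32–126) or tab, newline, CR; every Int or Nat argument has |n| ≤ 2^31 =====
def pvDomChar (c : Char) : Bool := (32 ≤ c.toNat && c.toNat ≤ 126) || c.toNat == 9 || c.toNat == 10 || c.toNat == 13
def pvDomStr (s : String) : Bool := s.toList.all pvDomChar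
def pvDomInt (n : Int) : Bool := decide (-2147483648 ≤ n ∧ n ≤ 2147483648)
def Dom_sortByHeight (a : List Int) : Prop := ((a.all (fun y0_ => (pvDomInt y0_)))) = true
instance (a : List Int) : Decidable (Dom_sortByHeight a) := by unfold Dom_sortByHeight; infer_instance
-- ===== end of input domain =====

-- B sorts the non-(-1) values once and scatters them into the recorded non-(-1)
-- positions of a copy, replacing A's repeated min()+index() rescans (objective: faster).

-- ===== PORT A =====
-- second loop of A: for each element, -1 passes through, otherwise append
-- min(notTree) to result and delete its first occurrence from notTree
def sortByHeightLoop : List Int → List Int → List Int → List Int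
  | [], result, _ => result
  | e :: t, result, notTree =>
    if e = -1 then sortByHeightLoop t (result ++ [e]) notTree
    else
      match PySem.List.min? notTree (fun x => x) with
      | none => sortByHeightLoop t result notTree      -- unreachable: Python min([]) would raise
      | some m =>
        match PySem.List.index? notTree m with
        | none => sortByHeightLoop t (result ++ [m]) notTree   -- unreachable: m ∈ notTree
        | some i => sortByHeightLoop t (result ++ [m]) (notTree.eraseIdx i)
          -- del notTree[i] with i = notTree.index(m) in range is exactly eraseIdx i

def sortByHeight (a : List Int) : List Int :=
  sortByHeightLoop a []
    (a.foldl (fun notTree element => if element ≠ -1 then notTree ++ [element] else notTree) [])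

-- ===== PORT B =====
def sortByHeight_alt (a : List Int) : List Int :=
  let idx : List Int :=
    (PySem.List.enumerate a).filterMap (fun p => if p.2 ≠ -1 then some p.1 else none)
  let vals : List Int := PySem.List.sorted (a.filter (fun x => decide (x ≠ -1))) (fun x => x)
  -- result[pos] = v : every pos comes from enumerate, hence 0 ≤ pos < len a,
  -- so Python's item assignment is exactly List.set pos.toNat
  (idx.zip vals).foldl (fun result p => result.set p.1.toNat p.2) a

-- ===== PRECONDITION & SPEC =====
def Spec_sortByHeight (a : List Int) (out : List Int) : Prop := out = sortByHeight_alt a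
instance (a : List Int) (out : List Int) : Decidable (Spec_sortByHeight a out) := by unfold Spec_sortByHeight; infer_instance

-- ===== CLAIM (what is proved, stated in full; the proofs are below) =====
def Claim_equal_sortByHeight : Prop := ∀ (a : List Int), Dom_sortByHeight a → Spec_sortByHeight a (sortByHeight a)

-- ===== LEMMAS AND PROOFS =====

-- common reference shape: consume sorted values left to right, skipping -1 positions
def fillSBH : List Int → List Int → List Int
  | [], _ => []
  | x :: t, vs =>
    if x = -1 then x :: fillSBH t vs
    else match vs with
      | [] => x :: fillSBH t []
      | v :: vr => v :: fillSBH t vr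

-- natural-number positions of the non-(-1) entries
def idxNatSBH : List Int → List Nat
  | [] => []
  | x :: t => if x = -1 then (idxNatSBH t).map (· + 1) else 0 :: (idxNatSBH t).map (· + 1)

theorem fillSBH_nil (a : List Int) : fillSBH a [] = a := by
  induction a with
  | nil => rfl
  | cons x t ih => by_cases hx : x = -1 <;> simp [fillSBH, hx, ih]
theorem scatter_shift (pairs : List (Nat × Int)) (x : Int) (res : List Int) :
    (pairs.map (fun p => (p.1 + 1, p.2))).foldl (fun r p => r.set p.1 p.2) (x :: res)
      = x :: pairs.foldl (fun r p => r.set p.1 p.2) res := by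
  induction pairs generalizing res with
  | nil => rfl
  | cons p ps ih => simp [List.set_cons_succ, ih]
theorem scatterNat (a : List Int) : ∀ (vs : List Int),
    ((idxNatSBH a).zip vs).foldl (fun r p => r.set p.1 p.2) a = fillSBH a vs := by
  induction a with
  | nil => intro vs; rfl
  | cons x t ih =>
    intro vs
    by_cases hx : x = -1
    · have : (Prod.map (· + 1 : Nat → Nat) (id : Int → Int)) = (fun p : Nat × Int => (p.1 + 1, p.2)) := by
        funext p; rfl
      simp only [idxNatSBH, hx, fillSBH, if_true, List.zip_map_left, this]
      rw [scatter_shift, ih vs]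
    · cases vs with
      | nil => simp [idxNatSBH, hx, fillSBH, fillSBH_nil]
      | cons v vr =>
        have hm : (Prod.map (· + 1 : Nat → Nat) (id : Int → Int)) = (fun p : Nat × Int => (p.1 + 1, p.2)) := by
          funext p; rfl
        simp only [idxNatSBH, hx, fillSBH, if_false, ite_false, List.zip_cons_cons,
          List.foldl_cons, List.zip_map_left, hm]
        rw [show (x :: t).set 0 v = v :: t from rfl, scatter_shift, ih vr]
theorem enumerate_cons (x : Int) (t : List Int) (k : Int) :
    PySem.List.enumerate (x :: t) k = (k, x) :: PySem.List.enumerate t (k + 1) := rfl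
theorem enumerate_filterMap_eq_idxNat (a : List Int) : ∀ (k : Nat),
    (PySem.List.enumerate a (k : Int)).filterMap (fun p => if p.2 ≠ -1 then some p.1 else none)
      = (idxNatSBH a).map (fun n => ((n + k : Nat) : Int)) := by
  induction a with
  | nil => intro k; rfl
  | cons x t ih =>
    intro k
    have h1 : ((k : Int) + 1) = ((k + 1 : Nat) : Int) := by push_cast; ring
    by_cases hx : x = -1
    · simp only [enumerate_cons, List.filterMap_cons, hx, idxNatSBH, if_true]
      rw [h1, ih (k+1), List.map_map]
      simp only [ne_eq, not_true_eq_false, if_false, ite_self, reduceIte]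
      apply List.map_congr_left; intro n _
      simp only [Function.comp_apply]; push_cast; ring
    · simp only [enumerate_cons, List.filterMap_cons, idxNatSBH, if_neg hx]
      rw [h1, ih (k+1), if_pos hx]
      simp only [List.map_cons, List.map_map, List.cons.injEq]
      refine ⟨by push_cast; ring, ?_⟩
      apply List.map_congr_left; intro n _
      simp only [Function.comp_apply]; push_cast; ring
theorem min?_isSome_of_ne_nil (s : List Int) (h : s ≠ []) :
    ∃ m, PySem.List.min? s (fun x => x) = some m := by
  cases hm : PySem.List.min? s (fun x => x) with
  | some m => exact ⟨m, rfl⟩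
  | none => exact absurd ((PySem.List.min?_eq_none_iff s (fun x => x)).mp hm) h
theorem eraseIdx_append_len (pre suf : List Int) (m : Int) :
    (pre ++ m :: suf).eraseIdx pre.length = pre ++ suf := by
  induction pre with
  | nil => rfl
  | cons p ps ih => simp [ih]
theorem eraseIdx_of_index? (s : List Int) (m : Int) (k : Nat)
    (h : PySem.List.index? s m = some k) : s.eraseIdx k = s.erase m := by
  obtain ⟨pre, suf, hs, hk, hnm⟩ := (PySem.List.index?_eq_some_iff s m k).1 h
  subst hs; subst hk
  rw [eraseIdx_append_len, List.erase_append_right _ (by simpa using hnm), List.erase_cons_head]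
theorem sorted_min_cons (s : List Int) (m : Int) (h : PySem.List.min? s (fun x => x) = some m) :
    PySem.List.sorted s (fun x => x) = m :: PySem.List.sorted (s.erase m) (fun x => x) := by
  have hmem : m ∈ s := PySem.List.min?_mem h
  have hmin : ∀ y ∈ s, m ≤ y := fun y hy => PySem.List.min?_isMin h y hy
  apply PySem.List.eq_of_perm_of_pairwise_le_of_injective (fun x : Int => x) (fun a b hab => hab)
  · exact (PySem.List.sorted_perm s _ _).trans
      ((List.perm_cons_erase hmem).trans (List.Perm.cons m (PySem.List.sorted_perm _ _ _).symm))
  · exact PySem.List.sorted_pairwise s _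
  · refine List.Pairwise.cons ?_ (PySem.List.sorted_pairwise _ _)
    intro y hy
    exact hmin y (List.mem_of_mem_erase ((PySem.List.sorted_perm _ _ _).mem_iff.1 hy))
theorem alt_eq_fill (a : List Int) :
    sortByHeight_alt a = fillSBH a (PySem.List.sorted (a.filter (fun x => decide (x ≠ -1))) (fun x => x)) := by
  show ((((PySem.List.enumerate a).filterMap (fun p => if p.2 ≠ -1 then some p.1 else none)).zip
      (PySem.List.sorted (a.filter (fun x => decide (x ≠ -1))) (fun x => x))).foldl
      (fun result p => result.set p.1.toNat p.2) a) = _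
  have h0 : PySem.List.enumerate a = PySem.List.enumerate a ((0 : Nat) : Int) := by norm_num
  rw [h0, enumerate_filterMap_eq_idxNat a 0]
  have h2 : (fun n : Nat => ((n + 0 : Nat) : Int)) = (fun n : Nat => (n : Int)) := by funext n; simp
  rw [h2, List.zip_map_left, List.foldl_map]
  have h3 : (fun (r : List Int) (p : Nat × Int) => r.set (Prod.map (fun n : Nat => (n : Int)) id p).1.toNat (Prod.map (fun n : Nat => (n : Int)) id p).2)
      = (fun (r : List Int) (p : Nat × Int) => r.set p.1 p.2) := by
    funext r p; simp [Prod.map]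
  rw [h3, scatterNat]
theorem loop_eq_fill (a : List Int) : ∀ (s res : List Int),
    a.countP (fun x => decide (x ≠ -1)) ≤ s.length →
    sortByHeightLoop a res s = res ++ fillSBH a (PySem.List.sorted s (fun x => x)) := by
  induction a with
  | nil => intro s res _; simp [sortByHeightLoop, fillSBH]
  | cons e t ih =>
    intro s res hle
    by_cases he : e = -1
    · rw [sortByHeightLoop, if_pos he, ih s (res ++ [e])
        (by rw [List.countP_cons] at hle; simpa [he] using hle)]
      simp [fillSBH, he]
    · have hcnt : t.countP (fun x => decide (x ≠ -1)) + 1 ≤ s.length := by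
        rw [List.countP_cons] at hle; simpa [he] using hle
      have hs : s ≠ [] := by intro h; subst h; simp at hcnt
      obtain ⟨m, hm⟩ := min?_isSome_of_ne_nil s hs
      have hmem : m ∈ s := PySem.List.min?_mem hm
      obtain ⟨k, hk⟩ : ∃ k, PySem.List.index? s m = some k := by
        cases hik : PySem.List.index? s m with
        | some k => exact ⟨k, rfl⟩
        | none => exact absurd ((PySem.List.index?_eq_none_iff s m).mp hik) (by simpa using hmem)
      rw [sortByHeightLoop, if_neg he, hm]
      dsimp only
      rw [hk]
      dsimp only
      rw [eraseIdx_of_index? s m k hk,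
        ih (s.erase m) (res ++ [m])
          (by rw [List.length_erase_of_mem hmem]; omega),
        sorted_min_cons s m hm]
      simp [fillSBH, he]

-- ===== VERDICT (by name: the statement is the Claim_ definition above) =====
theorem sortByHeight_spec : Claim_equal_sortByHeight := by
  intro a _
  show sortByHeight a = sortByHeight_alt a
  have hconv : (fun (notTree : List Int) (element : Int) =>
      if element ≠ -1 then notTree ++ [element] else notTree)
      = (fun acc x => if (fun y => decide (y ≠ -1)) x = true then acc ++ [(fun y => y) x] else acc) := by
    funext acc x; by_cases hx : x = -1 <;> simp [hx]
  rw [alt_eq_fill, sortByHeight, hconv,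
    PySem.List.foldl_append_if (fun x => decide (x ≠ -1)) (fun x => x) a []]
  simp only [List.map_id_fun', id]
  rw [loop_eq_fill a _ [] (by simp [List.countP_eq_length_filter])]
  simp
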